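-- pv_equiv track=rewrite | github.com/xiaobaoliu849/Universal-Media-Downloader | service/tasks/downloader.py | _strip_youtube_extractor_args
-- ===== SOURCE A (Python) =====
-- def _strip_youtube_extractor_args(args: list[str]) -> list[str]:
--     cleaned: list[str] = []
--     i = 0
--     while i < len(args):
--         cur = args[i]
--         if cur == '--extractor-args' and i + 1 < len(args):
--             nxt = args[i + 1]
--             if isinstance(nxt, str) and nxt.startswith('youtube:'):
--                 i += 2
--                 continue
--         cleaned.append(cur)
--         i += 1
--     return cleaned
-- ===== SOURCE B (Python) =====
-- def _strip_youtube_extractor_args(args: list[str]) -> list[str]: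
--     drop = set()
--     for i in range(len(args)):
--         if args[i] == '--extractor-args' and i + 1 < len(args) \
--                 and isinstance(args[i + 1], str) and args[i + 1].startswith('youtube:'):
--             drop.add(i)
--             drop.add(i + 1)
--     return [x for j, x in enumerate(args) if j not in drop]
-- ===== Notes on version B (the rewrite author's own statement) =====
-- stated objective: alternative
-- what changed: Replaces the coupled lookahead-and-skip while loop with two independent passes: first build a set of indices to drop (each '--extractor-args' position whose successor starts with 'youtube:', plus that successor), then filter by index.
import Mathlib
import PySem

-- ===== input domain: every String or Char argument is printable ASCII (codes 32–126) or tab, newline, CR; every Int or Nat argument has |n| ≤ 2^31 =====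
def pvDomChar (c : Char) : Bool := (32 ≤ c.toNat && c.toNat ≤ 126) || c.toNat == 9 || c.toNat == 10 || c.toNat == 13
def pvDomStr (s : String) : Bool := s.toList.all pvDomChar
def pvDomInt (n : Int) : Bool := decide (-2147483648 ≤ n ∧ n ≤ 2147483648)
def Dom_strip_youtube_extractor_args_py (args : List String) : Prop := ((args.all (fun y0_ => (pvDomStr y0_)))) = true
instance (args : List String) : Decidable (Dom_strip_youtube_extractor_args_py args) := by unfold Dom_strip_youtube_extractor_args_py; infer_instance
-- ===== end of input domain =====

-- B replaces A's coupled lookahead-and-skip walk by two independent passes (collect a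
-- set of indices to drop, then filter by index); objective: alternative decomposition.


-- ===== PORT A =====
-- Literal port of A's while loop as the obvious structural recursion: at each position,
-- if the current arg is '--extractor-args' and a next arg exists (the 'x :: y :: rest'
-- pattern IS 'i + 1 < len(args)') starting with 'youtube:', skip both, else keep and advance.
-- ('isinstance(nxt, str)' is always true under the list[str] typing.)
def strip_youtube_extractor_args_py (args : List String) : List String :=
  match args with
  | [] => []
  | [x] => [x]
  | x :: y :: rest =>
    if x == "--extractor-args" && PySem.Str.startswith y "youtube:" then
      strip_youtube_extractor_args_py rest
    else
      x :: strip_youtube_extractor_args_py (y :: rest)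
termination_by args.length

-- ===== PORT B =====
-- the loop-body condition of Source B (indices produced by range(len(args)) are in range,
-- so args[i] / args[i+1] are PySem.List.pyGetD; exact there)
def pvDropCond (args : List String) (i : Int) : Bool :=
  (PySem.List.pyGetD args i "" == "--extractor-args") &&
  decide (i + 1 < (args.length : Int)) &&
  PySem.Str.startswith (PySem.List.pyGetD args (i + 1) "") "youtube:"

def strip_youtube_extractor_args_py_alt (args : List String) : List String :=
  let drop : PySem.Set Int :=
    (PySem.List.pyRange 0 (args.length : Int) 1).foldl
      (fun d i => if pvDropCond args i then PySem.Set.add (PySem.Set.add d i) (i + 1) else d)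
      PySem.Set.empty
  ((PySem.List.enumerate args 0).filter (fun p => !(PySem.Set.contains drop p.1))).map (fun p => p.2)

-- ===== PRECONDITION & SPEC =====
def Spec_strip_youtube_extractor_args_py (args : List String) (out : List String) : Prop := out = strip_youtube_extractor_args_py_alt args
instance (args : List String) (out : List String) : Decidable (Spec_strip_youtube_extractor_args_py args out) := by unfold Spec_strip_youtube_extractor_args_py; infer_instance

-- ===== CLAIM (what is proved, stated in full; the proofs are below) =====
def Claim_equal_strip_youtube_extractor_args_py : Prop := ∀ (args : List String), Dom_strip_youtube_extractor_args_py args → Spec_strip_youtube_extractor_args_py args (strip_youtube_extractor_args_py args)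

-- ===== LEMMAS AND PROOFS =====

-- the drop condition at a Nat index, written over Nat
def pvNCond (args : List String) (k : Nat) : Bool :=
  (args.getD k "" == "--extractor-args") &&
  decide (k + 1 < args.length) &&
  PySem.Str.startswith (args.getD (k + 1) "") "youtube:"

theorem pv_cond_natCast (args : List String) (k : Nat) :
    pvDropCond args (k : Int) = pvNCond args k := by
  unfold pvDropCond pvNCond
  have e1 : PySem.List.pyGetD args (k : Int) "" = args.getD k "" := by
    simp only [PySem.List.pyGetD_natCast]
  have e2 : PySem.List.pyGetD args ((k : Int) + 1) "" = args.getD (k + 1) "" := by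
    rw [show ((k : Int) + 1) = ((k + 1 : Nat) : Int) by push_cast; ring]
    simp only [PySem.List.pyGetD_natCast]
  have e3 : decide ((k : Int) + 1 < (args.length : Int)) = decide (k + 1 < args.length) := by
    simp only [decide_eq_decide]; omega
  rw [e1, e2, e3]

-- the keep predicate B's filter amounts to, at nonnegative index
def pvKeep (args : List String) (j : Int) : Bool :=
  !(pvDropCond args j || (decide (1 ≤ j) && pvDropCond args (j - 1)))

def pvNKeep (args : List String) (k : Nat) : Bool :=
  !(pvNCond args k || (decide (1 ≤ k) && pvNCond args (k - 1)))

theorem pv_keep_natCast (args : List String) (k : Nat) :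
    pvKeep args (k : Int) = pvNKeep args k := by
  unfold pvKeep pvNKeep
  cases k with
  | zero =>
    have h := pv_cond_natCast args 0
    simp only [Nat.cast_zero] at h
    simp [h]
  | succ m =>
    rw [show ((m + 1 : Nat) : Int) - 1 = ((m : Nat) : Int) by push_cast; ring,
      pv_cond_natCast, pv_cond_natCast]
    have e1 : decide (1 ≤ ((m + 1 : Nat) : Int)) = true := by
      simp only [decide_eq_true_eq]; omega
    have e2 : decide (1 ≤ m + 1) = true := by simp
    rw [e1, e2, Nat.add_sub_cancel]

-- membership in the fold-built drop set
theorem pv_mem_foldl (args : List String) (ns : List Int) (s : PySem.Set Int) (j : Int) :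
    j ∈ ns.foldl
        (fun d i => if pvDropCond args i then PySem.Set.add (PySem.Set.add d i) (i + 1) else d) s
      ↔ j ∈ s ∨ ∃ i ∈ ns, pvDropCond args i ∧ (j = i ∨ j = i + 1) := by
  induction ns generalizing s with
  | nil => simp
  | cons n ns ih =>
    simp only [List.foldl_cons, ih]
    by_cases h : pvDropCond args n
    · simp only [h, if_true, PySem.Set.mem_add, List.mem_cons]
      constructor
      · rintro (((hs | hj) | hj) | ⟨i, hi, hc, hj⟩)
        · exact Or.inl hs
        · exact Or.inr ⟨n, Or.inl rfl, h, Or.inl hj⟩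
        · exact Or.inr ⟨n, Or.inl rfl, h, Or.inr hj⟩
        · exact Or.inr ⟨i, Or.inr hi, hc, hj⟩
      · rintro (hs | ⟨i, (hi | hi), hc, hj⟩)
        · exact Or.inl (Or.inl (Or.inl hs))
        · subst hi
          rcases hj with hj | hj
          · exact Or.inl (Or.inl (Or.inr hj))
          · exact Or.inl (Or.inr hj)
        · exact Or.inr ⟨i, hi, hc, hj⟩
    · rw [if_neg h]
      constructor
      · rintro (hs | ⟨i, hi, hc, hj⟩)
        · exact Or.inl hs
        · exact Or.inr ⟨i, List.mem_cons_of_mem n hi, hc, hj⟩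
      · rintro (hs | ⟨i, hi, hc, hj⟩)
        · exact Or.inl hs
        · rcases List.mem_cons.mp hi with hi | hi
          · subst hi; exact absurd hc h
          · exact Or.inr ⟨i, hi, hc, hj⟩

-- the drop condition implies the index is strictly below len - 1
theorem pv_cond_lt (args : List String) (i : Int) (h : pvDropCond args i = true) :
    i + 1 < (args.length : Int) := by
  simp only [pvDropCond, Bool.and_eq_true, decide_eq_true_eq] at h
  exact h.1.2

-- the fold-built drop set contains exactly the non-kept nonnegative indices
theorem pv_contains_drop (args : List String) (j : Int) (hj : 0 ≤ j) :
    (PySem.Set.contains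
      ((PySem.List.pyRange 0 (args.length : Int) 1).foldl
        (fun d i => if pvDropCond args i then PySem.Set.add (PySem.Set.add d i) (i + 1) else d)
        PySem.Set.empty) j)
      = !(pvKeep args j) := by
  have hmem : (j ∈ (PySem.List.pyRange 0 (args.length : Int) 1).foldl
        (fun d i => if pvDropCond args i then PySem.Set.add (PySem.Set.add d i) (i + 1) else d)
        PySem.Set.empty)
      ↔ (pvDropCond args j = true ∨ (1 ≤ j ∧ pvDropCond args (j - 1) = true)) := by
    rw [pv_mem_foldl]
    simp only [PySem.Set.empty, List.not_mem_nil, false_or, PySem.List.mem_pyRange_one]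
    constructor
    · rintro ⟨i, ⟨h0, hlt⟩, hc, (rfl | rfl)⟩
      · exact Or.inl hc
      · exact Or.inr ⟨by omega, by simpa using hc⟩
    · rintro (hc | ⟨h1, hc⟩)
      · exact ⟨j, ⟨hj, by have := pv_cond_lt args j hc; omega⟩, hc, Or.inl rfl⟩
      · exact ⟨j - 1, ⟨by omega, by have := pv_cond_lt args (j - 1) hc; omega⟩, hc, Or.inr (by ring)⟩
  rw [show (!(pvKeep args j)) = (pvDropCond args j || (decide (1 ≤ j) && pvDropCond args (j - 1)))
    from by simp [pvKeep]]
  rw [Bool.eq_iff_iff, PySem.Set.contains_iff, hmem]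
  simp

-- B, rewritten as one filter by the keep predicate
def pvG (args : List String) : List String :=
  ((PySem.List.enumerate args 0).filter (fun p => pvKeep args p.1)).map (fun p => p.2)

theorem pv_alt_eq_g (args : List String) :
    strip_youtube_extractor_args_py_alt args = pvG args := by
  unfold strip_youtube_extractor_args_py_alt pvG
  refine congrArg _ (List.filter_congr ?_)
  intro p hp
  rcases (PySem.List.mem_enumerate_iff _ _ _).mp hp with ⟨k, hk, rfl⟩
  simp only [pv_contains_drop args _ (by omega : (0 : Int) ≤ 0 + k), Bool.not_not]

-- shift lemma for the Nat-indexed condition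
theorem pv_ncond_shift (x : String) (l : List String) (k : Nat) :
    pvNCond (x :: l) (k + 1) = pvNCond l k := by
  unfold pvNCond
  simp only [List.getD_cons_succ, List.length_cons]
  congr 1
  congr 1
  simp only [decide_eq_decide]
  omega

-- a 'youtube:'-prefixed value is never itself '--extractor-args'
theorem pv_no_chain (y : String) (l : List String)
    (h : PySem.Str.startswith y "youtube:" = true) : pvNCond (y :: l) 0 = false := by
  unfold pvNCond
  by_cases hy : y = "--extractor-args"
  · subst hy; exact absurd h (by decide)
  · have : (y == "--extractor-args") = false := by
      simp [hy]
    simp [this]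

theorem pv_nkeep_shift (x : String) (l : List String) (k : Nat)
    (hx : k = 0 → pvNCond (x :: l) 0 = false) :
    pvNKeep (x :: l) (k + 1) = pvNKeep l k := by
  unfold pvNKeep
  cases k with
  | zero => simp [pv_ncond_shift, hx rfl]
  | succ m =>
    have e1 : decide (1 ≤ m + 1 + 1) = true := by simp
    have e2 : decide (1 ≤ m + 1) = true := by simp
    rw [e1, e2, Nat.add_sub_cancel, Nat.add_sub_cancel,
      pv_ncond_shift, show m + 1 = m + 1 from rfl, pv_ncond_shift]

-- the enumerate-shift identity
theorem pv_enum_shift (xs : List String) (s : Int) :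
    PySem.List.enumerate xs (s + 1) = (PySem.List.enumerate xs s).map (fun p => (p.1 + 1, p.2)) := by
  induction xs generalizing s with
  | nil => simp [PySem.List.enumerate_nil]
  | cons x xs ih =>
    rw [PySem.List.enumerate_cons, PySem.List.enumerate_cons, List.map_cons, ← ih]

-- pointwise replacement of an Int-indexed filter predicate under enumerate
theorem pv_filter_enum_congr (l : List String) (p q : Int × String → Bool)
    (h : ∀ (k : Nat) (hk : k < l.length), p ((k : Int), l[k]) = q ((k : Int), l[k])) :
    (PySem.List.enumerate l 0).filter p = (PySem.List.enumerate l 0).filter q := by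
  refine List.filter_congr ?_
  intro e he
  rcases (PySem.List.mem_enumerate_iff _ _ _).mp he with ⟨k, hk, rfl⟩
  simpa using h k hk

-- peel one element off pvG
theorem pv_g_cons (x : String) (l : List String) :
    pvG (x :: l) = (if pvNKeep (x :: l) 0 then [x] else []) ++
      ((PySem.List.enumerate l 0).filter (fun p => pvKeep (x :: l) (p.1 + 1))).map (fun p => p.2) := by
  unfold pvG
  rw [PySem.List.enumerate_cons, pv_enum_shift, List.filter_cons]
  have hz : pvKeep (x :: l) ((0 : Int), x).1 = pvNKeep (x :: l) 0 := by
    have h := pv_keep_natCast (x :: l) 0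
    simpa using h
  by_cases h : pvNKeep (x :: l) 0
  · rw [if_pos (by rw [hz]; exact h), if_pos h]
    rw [List.map_cons, List.singleton_append]
    congr 1
    rw [List.filter_map, List.map_map]
    rfl
  · rw [if_neg (by rw [hz]; exact h), if_neg h]
    rw [List.nil_append, List.filter_map, List.map_map]
    rfl

-- peel: the head is kept when the pair condition does not fire at index 0
theorem pv_peel_keep (x : String) (l : List String) (hx : pvNCond (x :: l) 0 = false) :
    pvG (x :: l) = x :: pvG l := by
  rw [pv_g_cons]
  have h0 : pvNKeep (x :: l) 0 = true := by unfold pvNKeep; simp [hx]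
  rw [h0, if_pos rfl]
  have hf : (PySem.List.enumerate l 0).filter (fun p => pvKeep (x :: l) (p.1 + 1)) =
      (PySem.List.enumerate l 0).filter (fun p => pvKeep l p.1) :=
    pv_filter_enum_congr l (fun p => pvKeep (x :: l) (p.1 + 1)) (fun p => pvKeep l p.1)
      (by
        intro k hk
        show pvKeep (x :: l) ((k : Int) + 1) = pvKeep l (k : Int)
        rw [show (k : Int) + 1 = ((k + 1 : Nat) : Int) by push_cast; ring, pv_keep_natCast,
          pv_keep_natCast, pv_nkeep_shift x l k (fun _ => hx)])
  rw [hf]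
  rfl

-- peel: a firing pair at index 0 removes both elements
theorem pv_peel_drop (x y : String) (rest : List String)
    (hx : pvNCond (x :: y :: rest) 0 = true)
    (hy : PySem.Str.startswith y "youtube:" = true) :
    pvG (x :: y :: rest) = pvG rest := by
  rw [pv_g_cons]
  have h0 : pvNKeep (x :: y :: rest) 0 = false := by unfold pvNKeep; simp [hx]
  rw [h0, if_neg (by simp), List.nil_append]
  rw [PySem.List.enumerate_cons, pv_enum_shift, List.filter_cons]
  have h1 : pvKeep (x :: y :: rest) (((0 : Int), y).1 + 1) = false := by
    have e : ((0 : Int), y).1 + 1 = ((1 : Nat) : Int) := by norm_num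
    rw [e, pv_keep_natCast]
    unfold pvNKeep
    simp [hx]
  rw [if_neg (by rw [h1]; simp), List.filter_map, List.map_map]
  have hf : (PySem.List.enumerate rest 0).filter
        ((fun p : Int × String => pvKeep (x :: y :: rest) (p.1 + 1)) ∘
          (fun p : Int × String => (p.1 + 1, p.2))) =
      (PySem.List.enumerate rest 0).filter (fun p => pvKeep rest p.1) :=
    pv_filter_enum_congr rest
      ((fun p : Int × String => pvKeep (x :: y :: rest) (p.1 + 1)) ∘
        (fun p : Int × String => (p.1 + 1, p.2)))
      (fun p => pvKeep rest p.1)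
      (by
      intro k hk
      show pvKeep (x :: y :: rest) ((k : Int) + 1 + 1) = pvKeep rest (k : Int)
      rw [show (k : Int) + 1 + 1 = ((k + 2 : Nat) : Int) by push_cast; ring, pv_keep_natCast,
        pv_keep_natCast,
        show k + 2 = (k + 1) + 1 from rfl,
        pv_nkeep_shift x (y :: rest) (k + 1) (fun h => (Nat.succ_ne_zero k h).elim),
        pv_nkeep_shift y rest k (fun _ => pv_no_chain y rest hy)])
      
  rw [hf]
  rfl

-- index-0 condition is exactly A's guard on a two-or-more list
theorem pv_ncond_zero (x y : String) (rest : List String) :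
    pvNCond (x :: y :: rest) 0 =
      (x == "--extractor-args" && PySem.Str.startswith y "youtube:") := by
  unfold pvNCond
  simp

-- the main induction, following A's recursion
theorem pv_main (args : List String) :
    pvG args = strip_youtube_extractor_args_py args := by
  fun_induction strip_youtube_extractor_args_py args with
  | case1 => simp [pvG, PySem.List.enumerate_nil]
  | case2 x =>
    have h0 : pvNKeep [x] 0 = true := by
      unfold pvNKeep pvNCond
      simp
    rw [pv_g_cons, h0, if_pos rfl]
    simp [PySem.List.enumerate_nil]
  | case3 x y rest hguard ih =>
    have hy : PySem.Str.startswith y "youtube:" = true := by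
      simp only [Bool.and_eq_true] at hguard; exact hguard.2
    have hx : pvNCond (x :: y :: rest) 0 = true := by
      rw [pv_ncond_zero]; exact hguard
    rw [pv_peel_drop x y rest hx hy, ih]
  | case4 x y rest hguard ih =>
    have hx : pvNCond (x :: y :: rest) 0 = false := by
      rw [pv_ncond_zero]; exact Bool.eq_false_iff.mpr hguard
    rw [pv_peel_keep x (y :: rest) hx, ih]

-- ===== VERDICT (by name: the statement is the Claim_ definition above) =====
theorem strip_youtube_extractor_args_py_spec : Claim_equal_strip_youtube_extractor_args_py := by
  intro args _
  unfold Spec_strip_youtube_extractor_args_py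
  rw [pv_alt_eq_g, pv_main]
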